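-- pv_equiv track=rewrite | github.com/Tranquil-Flow/hermes-neurovision | hermes_neurovision/vt.py | _rgb_to_ansi
-- ===== SOURCE A (Python) =====
-- def _rgb_to_ansi(r: int, g: int, b: int) -> int:
--     """Map an RGB color (0-255 each) to the nearest basic ANSI color (0-7)."""
--     # Basic ANSI colors and their approximate RGB values
--     ansi_rgb = [
--         (0, 0, 0),       # 0 black
--         (170, 0, 0),     # 1 red
--         (0, 170, 0),     # 2 green
--         (170, 170, 0),   # 3 yellow
--         (0, 0, 170),     # 4 blue
--         (170, 0, 170),   # 5 magenta
--         (0, 170, 170),   # 6 cyan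
--         (170, 170, 170), # 7 white
--     ]
--     best = 7
--     best_dist = float("inf")
--     for i, (ar, ag, ab) in enumerate(ansi_rgb):
--         dist = (r - ar) ** 2 + (g - ag) ** 2 + (b - ab) ** 2
--         if dist < best_dist:
--             best_dist = dist
--             best = i
--     return best
-- ===== SOURCE B (Python) =====
-- def _rgb_to_ansi(r: int, g: int, b: int) -> int:
--     """Map an RGB color (0-255 each) to the nearest basic ANSI color (0-7)."""
--     # The 8 basic ANSI colors are the corners of a cube with channels in {0, 170};
--     # squared distance is separable per channel, so pick each bit independently.
--     # A channel at the midpoint 85 ties and resolves toward 0 (the earlier color).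
--     return (1 if r > 85 else 0) + (2 if g > 85 else 0) + (4 if b > 85 else 0)
-- ===== Notes on version B (the rewrite author's own statement) =====
-- stated objective: simpler
-- what changed: Replaced the 8-candidate nearest-color distance scan with a closed-form per-channel bit test: each channel contributes its bit (1/2/4) iff it is strictly greater than 85, the cube midpoint; the tie at 85 resolves to 0 exactly as A's first-minimum scan does.
import Mathlib
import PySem

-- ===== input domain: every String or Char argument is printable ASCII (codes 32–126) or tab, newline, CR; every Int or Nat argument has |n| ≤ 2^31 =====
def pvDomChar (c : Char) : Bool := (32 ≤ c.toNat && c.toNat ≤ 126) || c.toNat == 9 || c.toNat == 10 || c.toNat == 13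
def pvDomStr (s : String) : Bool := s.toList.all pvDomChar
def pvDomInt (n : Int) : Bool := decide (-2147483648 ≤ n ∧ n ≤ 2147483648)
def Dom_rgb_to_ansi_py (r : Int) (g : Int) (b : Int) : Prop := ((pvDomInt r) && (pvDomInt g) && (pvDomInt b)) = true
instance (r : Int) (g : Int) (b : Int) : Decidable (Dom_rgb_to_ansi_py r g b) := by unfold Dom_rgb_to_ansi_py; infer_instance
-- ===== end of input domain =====

-- ===== PORT A =====
-- B replaces A's 8-way min-distance scan by a per-channel bit test; objective: simpler.
def pvAnsiRgb : List (Int × Int × Int) :=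
  [(0, 0, 0), (170, 0, 0), (0, 170, 0), (170, 170, 0),
   (0, 0, 170), (170, 0, 170), (0, 170, 170), (170, 170, 170)]

def pvDist (r g b c1 c2 c3 : Int) : Int :=
  (r - c1) ^ 2 + (g - c2) ^ 2 + (b - c3) ^ 2

-- Python's best_dist = float("inf") is modelled as `none` (any int compares below it)
def pvStep (r : Int) (g : Int) (b : Int) (st : Int × Option Int)
    (p : Int × (Int × Int × Int)) : Int × Option Int :=
  let dist := pvDist r g b p.2.1 p.2.2.1 p.2.2.2
  match st.2 with
  | none => (p.1, some dist)
  | some d => if dist < d then (p.1, some dist) else st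

def rgb_to_ansi_py (r : Int) (g : Int) (b : Int) : Int :=
  ((PySem.List.enumerate pvAnsiRgb).foldl (pvStep r g b) (7, none)).1

-- ===== PORT B =====
def rgb_to_ansi_py_alt (r : Int) (g : Int) (b : Int) : Int :=
  (if r > 85 then 1 else 0) + (if g > 85 then 2 else 0) + (if b > 85 then 4 else 0)

-- ===== PRECONDITION & SPEC =====
def Spec_rgb_to_ansi_py (r : Int) (g : Int) (b : Int) (out : Int) : Prop := out = rgb_to_ansi_py_alt r g b
instance (r : Int) (g : Int) (b : Int) (out : Int) : Decidable (Spec_rgb_to_ansi_py r g b out) := by unfold Spec_rgb_to_ansi_py; infer_instance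

-- ===== CLAIM (what is proved, stated in full; the proofs are below) =====
def Claim_equal_rgb_to_ansi_py : Prop := ∀ (r : Int) (g : Int) (b : Int), Dom_rgb_to_ansi_py r g b → Spec_rgb_to_ansi_py r g b (rgb_to_ansi_py r g b)

-- ===== LEMMAS AND PROOFS =====
theorem pvStep_none (r g b j i c1 c2 c3 : Int) :
    pvStep r g b (j, none) (i, (c1, c2, c3)) = (i, some (pvDist r g b c1 c2 c3)) := rfl

theorem pvStep_improve (r g b j : Int) (d : Int) (i c1 c2 c3 : Int)
    (h : pvDist r g b c1 c2 c3 < d) :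
    pvStep r g b (j, some d) (i, (c1, c2, c3)) = (i, some (pvDist r g b c1 c2 c3)) := by
  simp [pvStep, h]

theorem pvStep_skip (r g b j : Int) (d : Int) (i c1 c2 c3 : Int)
    (h : ¬ pvDist r g b c1 c2 c3 < d) :
    pvStep r g b (j, some d) (i, (c1, c2, c3)) = (j, some d) := by
  simp [pvStep, h]

-- ===== VERDICT (by name: the statement is the Claim_ definition above) =====
set_option maxHeartbeats 2000000 in
theorem rgb_to_ansi_py_spec : Claim_equal_rgb_to_ansi_py := by
  intro r g b _
  show rgb_to_ansi_py r g b = rgb_to_ansi_py_alt r g b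
  unfold rgb_to_ansi_py
  rw [show PySem.List.enumerate pvAnsiRgb = [((0 : Int), ((0 : Int), (0 : Int), (0 : Int))), ((1 : Int), ((170 : Int), (0 : Int), (0 : Int))), ((2 : Int), ((0 : Int), (170 : Int), (0 : Int))), ((3 : Int), ((170 : Int), (170 : Int), (0 : Int))), ((4 : Int), ((0 : Int), (0 : Int), (170 : Int))), ((5 : Int), ((170 : Int), (0 : Int), (170 : Int))), ((6 : Int), ((0 : Int), (170 : Int), (170 : Int))), ((7 : Int), ((170 : Int), (170 : Int), (170 : Int)))] from rfl]
  rw [List.foldl_cons, pvStep_none r g b 7 0 0 0 0]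
  rcases le_or_gt r 85 with hr | hr <;> rcases le_or_gt g 85 with hg | hg <;> rcases le_or_gt b 85 with hb | hb
  -- case r<=85 g<=85 b<=85
  ·
    rw [List.foldl_cons, pvStep_skip r g b 0 (pvDist r g b 0 0 0) 1 170 0 0 (not_lt.mpr (by simp only [pvDist] at *; nlinarith))]
    rw [List.foldl_cons, pvStep_skip r g b 0 (pvDist r g b 0 0 0) 2 0 170 0 (not_lt.mpr (by simp only [pvDist] at *; nlinarith))]
    rw [List.foldl_cons, pvStep_skip r g b 0 (pvDist r g b 0 0 0) 3 170 170 0 (not_lt.mpr (by simp only [pvDist] at *; nlinarith))]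
    rw [List.foldl_cons, pvStep_skip r g b 0 (pvDist r g b 0 0 0) 4 0 0 170 (not_lt.mpr (by simp only [pvDist] at *; nlinarith))]
    rw [List.foldl_cons, pvStep_skip r g b 0 (pvDist r g b 0 0 0) 5 170 0 170 (not_lt.mpr (by simp only [pvDist] at *; nlinarith))]
    rw [List.foldl_cons, pvStep_skip r g b 0 (pvDist r g b 0 0 0) 6 0 170 170 (not_lt.mpr (by simp only [pvDist] at *; nlinarith))]
    rw [List.foldl_cons, pvStep_skip r g b 0 (pvDist r g b 0 0 0) 7 170 170 170 (not_lt.mpr (by simp only [pvDist] at *; nlinarith))]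
    rw [List.foldl_nil]
    show (0 : Int) = rgb_to_ansi_py_alt r g b
    simp only [rgb_to_ansi_py_alt]
    split_ifs <;> omega
  -- case r<=85 g<=85 b>85
  ·
    rw [List.foldl_cons, pvStep_skip r g b 0 (pvDist r g b 0 0 0) 1 170 0 0 (not_lt.mpr (by simp only [pvDist] at *; nlinarith))]
    rw [List.foldl_cons, pvStep_skip r g b 0 (pvDist r g b 0 0 0) 2 0 170 0 (not_lt.mpr (by simp only [pvDist] at *; nlinarith))]
    rw [List.foldl_cons, pvStep_skip r g b 0 (pvDist r g b 0 0 0) 3 170 170 0 (not_lt.mpr (by simp only [pvDist] at *; nlinarith))]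
    rw [List.foldl_cons, pvStep_improve r g b 0 (pvDist r g b 0 0 0) 4 0 0 170 (by simp only [pvDist] at *; nlinarith)]
    rw [List.foldl_cons, pvStep_skip r g b 4 (pvDist r g b 0 0 170) 5 170 0 170 (not_lt.mpr (by simp only [pvDist] at *; nlinarith))]
    rw [List.foldl_cons, pvStep_skip r g b 4 (pvDist r g b 0 0 170) 6 0 170 170 (not_lt.mpr (by simp only [pvDist] at *; nlinarith))]
    rw [List.foldl_cons, pvStep_skip r g b 4 (pvDist r g b 0 0 170) 7 170 170 170 (not_lt.mpr (by simp only [pvDist] at *; nlinarith))]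
    rw [List.foldl_nil]
    show (4 : Int) = rgb_to_ansi_py_alt r g b
    simp only [rgb_to_ansi_py_alt]
    split_ifs <;> omega
  -- case r<=85 g>85 b<=85
  ·
    rw [List.foldl_cons, pvStep_skip r g b 0 (pvDist r g b 0 0 0) 1 170 0 0 (not_lt.mpr (by simp only [pvDist] at *; nlinarith))]
    rw [List.foldl_cons, pvStep_improve r g b 0 (pvDist r g b 0 0 0) 2 0 170 0 (by simp only [pvDist] at *; nlinarith)]
    rw [List.foldl_cons, pvStep_skip r g b 2 (pvDist r g b 0 170 0) 3 170 170 0 (not_lt.mpr (by simp only [pvDist] at *; nlinarith))]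
    rw [List.foldl_cons, pvStep_skip r g b 2 (pvDist r g b 0 170 0) 4 0 0 170 (not_lt.mpr (by simp only [pvDist] at *; nlinarith))]
    rw [List.foldl_cons, pvStep_skip r g b 2 (pvDist r g b 0 170 0) 5 170 0 170 (not_lt.mpr (by simp only [pvDist] at *; nlinarith))]
    rw [List.foldl_cons, pvStep_skip r g b 2 (pvDist r g b 0 170 0) 6 0 170 170 (not_lt.mpr (by simp only [pvDist] at *; nlinarith))]
    rw [List.foldl_cons, pvStep_skip r g b 2 (pvDist r g b 0 170 0) 7 170 170 170 (not_lt.mpr (by simp only [pvDist] at *; nlinarith))]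
    rw [List.foldl_nil]
    show (2 : Int) = rgb_to_ansi_py_alt r g b
    simp only [rgb_to_ansi_py_alt]
    split_ifs <;> omega
  -- case r<=85 g>85 b>85
  ·
    rw [List.foldl_cons, pvStep_skip r g b 0 (pvDist r g b 0 0 0) 1 170 0 0 (not_lt.mpr (by simp only [pvDist] at *; nlinarith))]
    rw [List.foldl_cons, pvStep_improve r g b 0 (pvDist r g b 0 0 0) 2 0 170 0 (by simp only [pvDist] at *; nlinarith)]
    rw [List.foldl_cons, pvStep_skip r g b 2 (pvDist r g b 0 170 0) 3 170 170 0 (not_lt.mpr (by simp only [pvDist] at *; nlinarith))]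
    rcases lt_or_ge (pvDist r g b 0 0 170) (pvDist r g b 0 170 0) with hc4_2 | hc4_2
    · rw [List.foldl_cons, pvStep_improve r g b 2 (pvDist r g b 0 170 0) 4 0 0 170 hc4_2]
      rw [List.foldl_cons, pvStep_skip r g b 4 (pvDist r g b 0 0 170) 5 170 0 170 (not_lt.mpr (by simp only [pvDist] at *; nlinarith))]
      rw [List.foldl_cons, pvStep_improve r g b 4 (pvDist r g b 0 0 170) 6 0 170 170 (by simp only [pvDist] at *; nlinarith)]
      rw [List.foldl_cons, pvStep_skip r g b 6 (pvDist r g b 0 170 170) 7 170 170 170 (not_lt.mpr (by simp only [pvDist] at *; nlinarith))]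
      rw [List.foldl_nil]
      show (6 : Int) = rgb_to_ansi_py_alt r g b
      simp only [rgb_to_ansi_py_alt]
      split_ifs <;> omega
    · rw [List.foldl_cons, pvStep_skip r g b 2 (pvDist r g b 0 170 0) 4 0 0 170 (not_lt.mpr hc4_2)]
      rw [List.foldl_cons, pvStep_skip r g b 2 (pvDist r g b 0 170 0) 5 170 0 170 (not_lt.mpr (by simp only [pvDist] at *; nlinarith))]
      rw [List.foldl_cons, pvStep_improve r g b 2 (pvDist r g b 0 170 0) 6 0 170 170 (by simp only [pvDist] at *; nlinarith)]
      rw [List.foldl_cons, pvStep_skip r g b 6 (pvDist r g b 0 170 170) 7 170 170 170 (not_lt.mpr (by simp only [pvDist] at *; nlinarith))]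
      rw [List.foldl_nil]
      show (6 : Int) = rgb_to_ansi_py_alt r g b
      simp only [rgb_to_ansi_py_alt]
      split_ifs <;> omega
  -- case r>85 g<=85 b<=85
  ·
    rw [List.foldl_cons, pvStep_improve r g b 0 (pvDist r g b 0 0 0) 1 170 0 0 (by simp only [pvDist] at *; nlinarith)]
    rw [List.foldl_cons, pvStep_skip r g b 1 (pvDist r g b 170 0 0) 2 0 170 0 (not_lt.mpr (by simp only [pvDist] at *; nlinarith))]
    rw [List.foldl_cons, pvStep_skip r g b 1 (pvDist r g b 170 0 0) 3 170 170 0 (not_lt.mpr (by simp only [pvDist] at *; nlinarith))]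
    rw [List.foldl_cons, pvStep_skip r g b 1 (pvDist r g b 170 0 0) 4 0 0 170 (not_lt.mpr (by simp only [pvDist] at *; nlinarith))]
    rw [List.foldl_cons, pvStep_skip r g b 1 (pvDist r g b 170 0 0) 5 170 0 170 (not_lt.mpr (by simp only [pvDist] at *; nlinarith))]
    rw [List.foldl_cons, pvStep_skip r g b 1 (pvDist r g b 170 0 0) 6 0 170 170 (not_lt.mpr (by simp only [pvDist] at *; nlinarith))]
    rw [List.foldl_cons, pvStep_skip r g b 1 (pvDist r g b 170 0 0) 7 170 170 170 (not_lt.mpr (by simp only [pvDist] at *; nlinarith))]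
    rw [List.foldl_nil]
    show (1 : Int) = rgb_to_ansi_py_alt r g b
    simp only [rgb_to_ansi_py_alt]
    split_ifs <;> omega
  -- case r>85 g<=85 b>85
  ·
    rw [List.foldl_cons, pvStep_improve r g b 0 (pvDist r g b 0 0 0) 1 170 0 0 (by simp only [pvDist] at *; nlinarith)]
    rw [List.foldl_cons, pvStep_skip r g b 1 (pvDist r g b 170 0 0) 2 0 170 0 (not_lt.mpr (by simp only [pvDist] at *; nlinarith))]
    rw [List.foldl_cons, pvStep_skip r g b 1 (pvDist r g b 170 0 0) 3 170 170 0 (not_lt.mpr (by simp only [pvDist] at *; nlinarith))]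
    rcases lt_or_ge (pvDist r g b 0 0 170) (pvDist r g b 170 0 0) with hc4_1 | hc4_1
    · rw [List.foldl_cons, pvStep_improve r g b 1 (pvDist r g b 170 0 0) 4 0 0 170 hc4_1]
      rw [List.foldl_cons, pvStep_improve r g b 4 (pvDist r g b 0 0 170) 5 170 0 170 (by simp only [pvDist] at *; nlinarith)]
      rw [List.foldl_cons, pvStep_skip r g b 5 (pvDist r g b 170 0 170) 6 0 170 170 (not_lt.mpr (by simp only [pvDist] at *; nlinarith))]
      rw [List.foldl_cons, pvStep_skip r g b 5 (pvDist r g b 170 0 170) 7 170 170 170 (not_lt.mpr (by simp only [pvDist] at *; nlinarith))]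
      rw [List.foldl_nil]
      show (5 : Int) = rgb_to_ansi_py_alt r g b
      simp only [rgb_to_ansi_py_alt]
      split_ifs <;> omega
    · rw [List.foldl_cons, pvStep_skip r g b 1 (pvDist r g b 170 0 0) 4 0 0 170 (not_lt.mpr hc4_1)]
      rw [List.foldl_cons, pvStep_improve r g b 1 (pvDist r g b 170 0 0) 5 170 0 170 (by simp only [pvDist] at *; nlinarith)]
      rw [List.foldl_cons, pvStep_skip r g b 5 (pvDist r g b 170 0 170) 6 0 170 170 (not_lt.mpr (by simp only [pvDist] at *; nlinarith))]
      rw [List.foldl_cons, pvStep_skip r g b 5 (pvDist r g b 170 0 170) 7 170 170 170 (not_lt.mpr (by simp only [pvDist] at *; nlinarith))]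
      rw [List.foldl_nil]
      show (5 : Int) = rgb_to_ansi_py_alt r g b
      simp only [rgb_to_ansi_py_alt]
      split_ifs <;> omega
  -- case r>85 g>85 b<=85
  ·
    rw [List.foldl_cons, pvStep_improve r g b 0 (pvDist r g b 0 0 0) 1 170 0 0 (by simp only [pvDist] at *; nlinarith)]
    rcases lt_or_ge (pvDist r g b 0 170 0) (pvDist r g b 170 0 0) with hc2_1 | hc2_1
    · rw [List.foldl_cons, pvStep_improve r g b 1 (pvDist r g b 170 0 0) 2 0 170 0 hc2_1]
      rw [List.foldl_cons, pvStep_improve r g b 2 (pvDist r g b 0 170 0) 3 170 170 0 (by simp only [pvDist] at *; nlinarith)]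
      rw [List.foldl_cons, pvStep_skip r g b 3 (pvDist r g b 170 170 0) 4 0 0 170 (not_lt.mpr (by simp only [pvDist] at *; nlinarith))]
      rw [List.foldl_cons, pvStep_skip r g b 3 (pvDist r g b 170 170 0) 5 170 0 170 (not_lt.mpr (by simp only [pvDist] at *; nlinarith))]
      rw [List.foldl_cons, pvStep_skip r g b 3 (pvDist r g b 170 170 0) 6 0 170 170 (not_lt.mpr (by simp only [pvDist] at *; nlinarith))]
      rw [List.foldl_cons, pvStep_skip r g b 3 (pvDist r g b 170 170 0) 7 170 170 170 (not_lt.mpr (by simp only [pvDist] at *; nlinarith))]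
      rw [List.foldl_nil]
      show (3 : Int) = rgb_to_ansi_py_alt r g b
      simp only [rgb_to_ansi_py_alt]
      split_ifs <;> omega
    · rw [List.foldl_cons, pvStep_skip r g b 1 (pvDist r g b 170 0 0) 2 0 170 0 (not_lt.mpr hc2_1)]
      rw [List.foldl_cons, pvStep_improve r g b 1 (pvDist r g b 170 0 0) 3 170 170 0 (by simp only [pvDist] at *; nlinarith)]
      rw [List.foldl_cons, pvStep_skip r g b 3 (pvDist r g b 170 170 0) 4 0 0 170 (not_lt.mpr (by simp only [pvDist] at *; nlinarith))]
      rw [List.foldl_cons, pvStep_skip r g b 3 (pvDist r g b 170 170 0) 5 170 0 170 (not_lt.mpr (by simp only [pvDist] at *; nlinarith))]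
      rw [List.foldl_cons, pvStep_skip r g b 3 (pvDist r g b 170 170 0) 6 0 170 170 (not_lt.mpr (by simp only [pvDist] at *; nlinarith))]
      rw [List.foldl_cons, pvStep_skip r g b 3 (pvDist r g b 170 170 0) 7 170 170 170 (not_lt.mpr (by simp only [pvDist] at *; nlinarith))]
      rw [List.foldl_nil]
      show (3 : Int) = rgb_to_ansi_py_alt r g b
      simp only [rgb_to_ansi_py_alt]
      split_ifs <;> omega
  -- case r>85 g>85 b>85
  ·
    rw [List.foldl_cons, pvStep_improve r g b 0 (pvDist r g b 0 0 0) 1 170 0 0 (by simp only [pvDist] at *; nlinarith)]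
    rcases lt_or_ge (pvDist r g b 0 170 0) (pvDist r g b 170 0 0) with hc2_1 | hc2_1
    · rw [List.foldl_cons, pvStep_improve r g b 1 (pvDist r g b 170 0 0) 2 0 170 0 hc2_1]
      rw [List.foldl_cons, pvStep_improve r g b 2 (pvDist r g b 0 170 0) 3 170 170 0 (by simp only [pvDist] at *; nlinarith)]
      rcases lt_or_ge (pvDist r g b 0 0 170) (pvDist r g b 170 170 0) with hc4_3 | hc4_3
      · rw [List.foldl_cons, pvStep_improve r g b 3 (pvDist r g b 170 170 0) 4 0 0 170 hc4_3]
        rw [List.foldl_cons, pvStep_improve r g b 4 (pvDist r g b 0 0 170) 5 170 0 170 (by simp only [pvDist] at *; nlinarith)]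
        rw [List.foldl_cons, pvStep_improve r g b 5 (pvDist r g b 170 0 170) 6 0 170 170 (by simp only [pvDist] at *; nlinarith)]
        rw [List.foldl_cons, pvStep_improve r g b 6 (pvDist r g b 0 170 170) 7 170 170 170 (by simp only [pvDist] at *; nlinarith)]
        rw [List.foldl_nil]
        show (7 : Int) = rgb_to_ansi_py_alt r g b
        simp only [rgb_to_ansi_py_alt]
        split_ifs <;> omega
      · rw [List.foldl_cons, pvStep_skip r g b 3 (pvDist r g b 170 170 0) 4 0 0 170 (not_lt.mpr hc4_3)]
        rcases lt_or_ge (pvDist r g b 170 0 170) (pvDist r g b 170 170 0) with hc5_3 | hc5_3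
        · rw [List.foldl_cons, pvStep_improve r g b 3 (pvDist r g b 170 170 0) 5 170 0 170 hc5_3]
          rw [List.foldl_cons, pvStep_improve r g b 5 (pvDist r g b 170 0 170) 6 0 170 170 (by simp only [pvDist] at *; nlinarith)]
          rw [List.foldl_cons, pvStep_improve r g b 6 (pvDist r g b 0 170 170) 7 170 170 170 (by simp only [pvDist] at *; nlinarith)]
          rw [List.foldl_nil]
          show (7 : Int) = rgb_to_ansi_py_alt r g b
          simp only [rgb_to_ansi_py_alt]
          split_ifs <;> omega
        · rw [List.foldl_cons, pvStep_skip r g b 3 (pvDist r g b 170 170 0) 5 170 0 170 (not_lt.mpr hc5_3)]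
          rcases lt_or_ge (pvDist r g b 0 170 170) (pvDist r g b 170 170 0) with hc6_3 | hc6_3
          · rw [List.foldl_cons, pvStep_improve r g b 3 (pvDist r g b 170 170 0) 6 0 170 170 hc6_3]
            rw [List.foldl_cons, pvStep_improve r g b 6 (pvDist r g b 0 170 170) 7 170 170 170 (by simp only [pvDist] at *; nlinarith)]
            rw [List.foldl_nil]
            show (7 : Int) = rgb_to_ansi_py_alt r g b
            simp only [rgb_to_ansi_py_alt]
            split_ifs <;> omega
          · rw [List.foldl_cons, pvStep_skip r g b 3 (pvDist r g b 170 170 0) 6 0 170 170 (not_lt.mpr hc6_3)]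
            rw [List.foldl_cons, pvStep_improve r g b 3 (pvDist r g b 170 170 0) 7 170 170 170 (by simp only [pvDist] at *; nlinarith)]
            rw [List.foldl_nil]
            show (7 : Int) = rgb_to_ansi_py_alt r g b
            simp only [rgb_to_ansi_py_alt]
            split_ifs <;> omega
    · rw [List.foldl_cons, pvStep_skip r g b 1 (pvDist r g b 170 0 0) 2 0 170 0 (not_lt.mpr hc2_1)]
      rw [List.foldl_cons, pvStep_improve r g b 1 (pvDist r g b 170 0 0) 3 170 170 0 (by simp only [pvDist] at *; nlinarith)]
      rcases lt_or_ge (pvDist r g b 0 0 170) (pvDist r g b 170 170 0) with hc4_3 | hc4_3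
      · rw [List.foldl_cons, pvStep_improve r g b 3 (pvDist r g b 170 170 0) 4 0 0 170 hc4_3]
        rw [List.foldl_cons, pvStep_improve r g b 4 (pvDist r g b 0 0 170) 5 170 0 170 (by simp only [pvDist] at *; nlinarith)]
        rw [List.foldl_cons, pvStep_skip r g b 5 (pvDist r g b 170 0 170) 6 0 170 170 (not_lt.mpr (by simp only [pvDist] at *; nlinarith))]
        rw [List.foldl_cons, pvStep_improve r g b 5 (pvDist r g b 170 0 170) 7 170 170 170 (by simp only [pvDist] at *; nlinarith)]
        rw [List.foldl_nil]
        show (7 : Int) = rgb_to_ansi_py_alt r g b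
        simp only [rgb_to_ansi_py_alt]
        split_ifs <;> omega
      · rw [List.foldl_cons, pvStep_skip r g b 3 (pvDist r g b 170 170 0) 4 0 0 170 (not_lt.mpr hc4_3)]
        rcases lt_or_ge (pvDist r g b 170 0 170) (pvDist r g b 170 170 0) with hc5_3 | hc5_3
        · rw [List.foldl_cons, pvStep_improve r g b 3 (pvDist r g b 170 170 0) 5 170 0 170 hc5_3]
          rw [List.foldl_cons, pvStep_skip r g b 5 (pvDist r g b 170 0 170) 6 0 170 170 (not_lt.mpr (by simp only [pvDist] at *; nlinarith))]
          rw [List.foldl_cons, pvStep_improve r g b 5 (pvDist r g b 170 0 170) 7 170 170 170 (by simp only [pvDist] at *; nlinarith)]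
          rw [List.foldl_nil]
          show (7 : Int) = rgb_to_ansi_py_alt r g b
          simp only [rgb_to_ansi_py_alt]
          split_ifs <;> omega
        · rw [List.foldl_cons, pvStep_skip r g b 3 (pvDist r g b 170 170 0) 5 170 0 170 (not_lt.mpr hc5_3)]
          rw [List.foldl_cons, pvStep_skip r g b 3 (pvDist r g b 170 170 0) 6 0 170 170 (not_lt.mpr (by simp only [pvDist] at *; nlinarith))]
          rw [List.foldl_cons, pvStep_improve r g b 3 (pvDist r g b 170 170 0) 7 170 170 170 (by simp only [pvDist] at *; nlinarith)]
          rw [List.foldl_nil]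
          show (7 : Int) = rgb_to_ansi_py_alt r g b
          simp only [rgb_to_ansi_py_alt]
          split_ifs <;> omega
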